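-- pv_equiv track=rewrite | github.com/josfervi/Programming-for-Sport | zz_firecode.io/02-insert_stars.py | insert_star_between_pairs1
-- ===== SOURCE A (Python) =====
-- def insert_star_between_pairs1(a_string):
--
--     if a_string is None:
--         return None
--
--     if a_string == "":
--         return ""
--
--     res= a_string[0]
--
--     for i in range(1, len(a_string)):
--         if a_string[i-1] == a_string[i]:
--             res+= '*'
--         res+= a_string[i]
--
--     return res
-- ===== SOURCE B (Python) =====
-- def insert_star_between_pairs1(a_string):
--     if a_string is None:
--         return None
--     # Stage 1: group the string into maximal runs of equal characters.
--     runs = []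
--     for c in a_string:
--         if runs and runs[-1][-1] == c:
--             runs[-1] += c
--         else:
--             runs.append(c)
--     # Stage 2: star-join inside each run, concatenate the runs plainly.
--     return ''.join('*'.join(run) for run in runs)
-- ===== Notes on version B (the rewrite author's own statement) =====
-- stated objective: alternative
-- what changed: Replaces the single-pass pairwise index loop by a run-length decomposition: the string is first grouped into maximal runs of equal characters, then each run is star-joined and the runs are concatenated.
import Mathlib
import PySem

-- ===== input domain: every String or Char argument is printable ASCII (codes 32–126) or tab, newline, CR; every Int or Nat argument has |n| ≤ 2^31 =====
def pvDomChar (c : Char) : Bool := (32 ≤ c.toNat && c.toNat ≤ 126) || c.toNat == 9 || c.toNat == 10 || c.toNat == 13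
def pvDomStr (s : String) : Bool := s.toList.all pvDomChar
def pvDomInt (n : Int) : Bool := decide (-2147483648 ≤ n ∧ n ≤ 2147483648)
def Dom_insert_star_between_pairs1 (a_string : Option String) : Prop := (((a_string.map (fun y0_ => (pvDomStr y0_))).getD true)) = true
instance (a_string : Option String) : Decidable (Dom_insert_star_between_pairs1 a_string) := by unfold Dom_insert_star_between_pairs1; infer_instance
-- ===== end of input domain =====

-- B replaces A's pairwise index loop by a run-length decomposition (group into maximal runs, '*'-join each run); same O(n) cost, different algorithm.


-- ===== PORT A =====
def insert_star_between_pairs1 (a_string : Option String) : Option String :=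
  match a_string with
  | none => none
  | some s =>
    if s = "" then some "" else
      let cs := s.toList
      let res :=
        (PySem.List.pyRange 1 (cs.length : Int) 1).foldl
          (fun res i =>
            (res ++ (if PySem.List.pyGetD cs (i - 1) ' ' = PySem.List.pyGetD cs i ' '
                     then ['*'] else [])) ++ [PySem.List.pyGetD cs i ' '])
          [PySem.List.pyGetD cs 0 ' ']
      some (String.ofList res)

-- ===== PORT B =====
-- Source B's grouping loop: extend the last run when its last char equals c, else start a new run.
def pvAltStep (runs : List (List Char)) (c : Char) : List (List Char) :=
  match runs.getLast? with
  | some r => if r.getLast? = some c then runs.dropLast ++ [r ++ [c]] else runs ++ [[c]]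
  | none => [[c]]

def insert_star_between_pairs1_alt (a_string : Option String) : Option String :=
  match a_string with
  | none => none
  | some s =>
    let runs := s.toList.foldl pvAltStep []
    -- ''.join('*'.join(run) for run in runs)
    some (String.ofList ((runs.map (fun r => List.intersperse '*' r)).flatten))

-- ===== PRECONDITION & SPEC =====
def Spec_insert_star_between_pairs1 (a_string : Option String) (out : Option String) : Prop := out = insert_star_between_pairs1_alt a_string
instance (a_string : Option String) (out : Option String) : Decidable (Spec_insert_star_between_pairs1 a_string out) := by unfold Spec_insert_star_between_pairs1; infer_instance

-- ===== CLAIM (what is proved, stated in full; the proofs are below) =====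
def Claim_equal_insert_star_between_pairs1 : Prop := ∀ (a_string : Option String), Dom_insert_star_between_pairs1 a_string → Spec_insert_star_between_pairs1 a_string (insert_star_between_pairs1 a_string)

-- ===== LEMMAS AND PROOFS =====

-- Reference form of the result: the starred string, by structural recursion.
def pvStar : List Char → List Char
  | [] => []
  | [c] => [c]
  | a :: b :: rest => a :: (if a = b then '*' :: pvStar (b :: rest) else pvStar (b :: rest))

-- ---- A-side: A's fold equals pvStar ----

lemma foldl_append_chunk {α β : Type} (a : α → List β) (b : α → β) :
    ∀ (l : List α) (acc : List β),
      l.foldl (fun acc i => (acc ++ a i) ++ [b i]) acc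
        = acc ++ l.flatMap (fun i => a i ++ [b i]) := by
  intro l
  induction l with
  | nil => intro acc; simp
  | cons x xs ih => intro acc; rw [List.foldl_cons, ih]; simp [List.append_assoc, List.flatMap]

lemma zip_tail_eq_map_range (cs : List Char) :
    cs.zip cs.tail
      = (List.range (cs.length - 1)).map
          (fun k => (cs.getD k ' ', cs.getD (k + 1) ' ')) := by
  apply List.ext_getElem
  · simp [List.length_zip, List.length_tail]
  · intro i h1 h2
    have hlen : i < cs.length - 1 := by
      simpa [List.length_zip, List.length_tail] using h1
    have hi : i < cs.length := by omega
    have hi1 : i + 1 < cs.length := by omega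
    simp [List.getElem_zip, List.getElem_tail, hi, hi1]

lemma a_fold_eq_flat (cs : List Char) (hne : cs ≠ []) :
    (PySem.List.pyRange 1 (cs.length : Int) 1).foldl
        (fun res i =>
          (res ++ (if PySem.List.pyGetD cs (i - 1) ' ' = PySem.List.pyGetD cs i ' '
                   then ['*'] else [])) ++ [PySem.List.pyGetD cs i ' '])
        [PySem.List.pyGetD cs 0 ' ']
      = cs.headD ' ' ::
          (cs.zip cs.tail).flatMap
            (fun pc => if pc.1 = pc.2 then ['*', pc.2] else [pc.2]) := by
  rw [foldl_append_chunk, PySem.List.pyRange_one, zip_tail_eq_map_range,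
    List.flatMap_map, List.flatMap_map]
  have hcast : ((cs.length : Int) - 1).toNat = cs.length - 1 := by omega
  rw [hcast]
  have hfun : (fun k : Nat =>
      (if PySem.List.pyGetD cs ((1 : Int) + k - 1) ' ' = PySem.List.pyGetD cs (1 + k) ' '
       then ['*'] else []) ++ [PySem.List.pyGetD cs (1 + k) ' '])
      = (fun k : Nat =>
        if cs.getD k ' ' = cs.getD (k + 1) ' '
        then ['*', cs.getD (k + 1) ' '] else [cs.getD (k + 1) ' ']) := by
    funext k
    have h1 : (1 : Int) + k - 1 = (k : Int) := by omega
    have h2 : (1 : Int) + k = ((k + 1 : Nat) : Int) := by push_cast; omega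
    rw [h1, h2, PySem.List.pyGetD_natCast, PySem.List.pyGetD_natCast]
    split <;> simp
  rw [hfun]
  cases cs with
  | nil => exact absurd rfl hne
  | cons c rest =>
    have h0 : PySem.List.pyGetD (c :: rest) 0 ' ' = c := by simp [pysem]
    simp [h0]

lemma flat_eq_star : ∀ (cs : List Char), cs ≠ [] →
    cs.headD ' ' ::
        (cs.zip cs.tail).flatMap
          (fun pc => if pc.1 = pc.2 then ['*', pc.2] else [pc.2])
      = pvStar cs := by
  intro cs
  induction cs with
  | nil => intro h; exact absurd rfl h
  | cons a t ih =>
    intro _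
    cases t with
    | nil => simp [pvStar]
    | cons b rest =>
      have hb := ih (by simp)
      simp only [List.headD_cons, List.tail_cons] at hb
      simp only [List.tail_cons, List.zip_cons_cons, List.flatMap_cons, List.headD_cons, pvStar]
      by_cases hab : a = b
      · simp [hab, ← hb]
      · simp [hab, ← hb]

-- ---- B-side: the run-grouping fold renders to pvStar ----

def pvRender (runs : List (List Char)) : List Char :=
  (runs.map (fun r => List.intersperse '*' r)).flatten

-- the suffix that pvStar produces after a character x: pvStar (x :: cs) = x :: pvG x cs
def pvG : Char → List Char → List Char
  | _, [] => []
  | x, c :: cs => if x = c then '*' :: c :: pvG c cs else c :: pvG c cs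

lemma star_eq_g (x : Char) (cs : List Char) : pvStar (x :: cs) = x :: pvG x cs := by
  induction cs generalizing x with
  | nil => rfl
  | cons c cs ih => simp [pvStar, pvG, ih c]

lemma intersperse_append_last (l : List Char) (c : Char) (h : l ≠ []) :
    List.intersperse '*' (l ++ [c]) = List.intersperse '*' l ++ ['*', c] := by
  induction l with
  | nil => exact absurd rfl h
  | cons a t ih =>
    cases t with
    | nil => rfl
    | cons b u =>
      have h1 := ih (by simp)
      show a :: '*' :: List.intersperse '*' ((b :: u) ++ [c])
          = (a :: '*' :: List.intersperse '*' (b :: u)) ++ ['*', c]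
      rw [h1]; simp

lemma render_append (R : List (List Char)) (r : List Char) :
    pvRender (R ++ [r]) = pvRender R ++ List.intersperse '*' r := by
  simp [pvRender]

lemma fold_render (cs : List Char) :
    ∀ (R : List (List Char)) (r : List Char) (x : Char),
      pvRender (cs.foldl pvAltStep (R ++ [r ++ [x]]))
        = pvRender (R ++ [r ++ [x]]) ++ pvG x cs := by
  induction cs with
  | nil => intro R r x; simp [pvG]
  | cons c cs ih =>
    intro R r x
    have hlast : (R ++ [r ++ [x]]).getLast? = some (r ++ [x]) := by
      simp [List.getLast?_append]
    have hlast2 : (r ++ [x]).getLast? = some x := by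
      simp
    by_cases hxc : x = c
    · have hstep : pvAltStep (R ++ [r ++ [x]]) c = R ++ [(r ++ [x]) ++ [c]] := by
        simp [pvAltStep, hxc]
      rw [List.foldl_cons, hstep, ih R (r ++ [x]) c]
      simp only [render_append]
      rw [intersperse_append_last (r ++ [x]) c (by simp)]
      simp [pvG, hxc, List.append_assoc]
    · have hstep : pvAltStep (R ++ [r ++ [x]]) c = (R ++ [r ++ [x]]) ++ [[c]] := by
        simp [pvAltStep, hlast, hlast2, hxc]
      rw [List.foldl_cons, hstep]
      have := ih (R ++ [r ++ [x]]) [] c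
      simp only [List.nil_append] at this
      rw [this]
      simp only [render_append]
      simp [pvG, hxc, List.intersperse]
    
lemma b_eq_star (cs : List Char) :
    pvRender (cs.foldl pvAltStep []) = pvStar cs := by
  cases cs with
  | nil => rfl
  | cons c cs =>
    have hstep : pvAltStep [] c = [[c]] := by simp [pvAltStep]
    rw [List.foldl_cons, hstep]
    have := fold_render cs [] [] c
    simp only [List.nil_append] at this
    rw [this, star_eq_g]
    simp [pvRender, List.intersperse]

-- ===== VERDICT (by name: the statement is the Claim_ definition above) =====
theorem insert_star_between_pairs1_spec : Claim_equal_insert_star_between_pairs1 := by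
  intro a_string _
  unfold Spec_insert_star_between_pairs1 insert_star_between_pairs1 insert_star_between_pairs1_alt
  match a_string with
  | none => rfl
  | some s =>
    by_cases hs : s = ""
    · subst hs; simp
    · have hne : s.toList ≠ [] := by
        intro h; exact hs (String.toList_eq_nil_iff.mp h)
      simp only [hs, ite_false]
      rw [a_fold_eq_flat s.toList hne, flat_eq_star s.toList hne]
      have h := b_eq_star s.toList
      unfold pvRender at h
      rw [h]
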